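-- pv_equiv track=rewrite | github.com/tudeski92/ipcalculator | ipcalc.py | turn_ip_to_bin
-- ===== SOURCE A (Python) =====
-- def dec_to_bin(decimal):
--     mylist = []
--     while decimal != 1:
--         if decimal == 0:
--             break
--         elif decimal % 2 == 0:
--             mylist.append(str(0))
--             decimal = decimal // 2
--         elif decimal % 2 == 1:
--             mylist.append(str(1))
--             decimal = decimal // 2
--     if decimal == 0:
--         mylist.append(str(0))
--     else:
--         mylist.append(str(1))
--     return ''.join(mylist[::-1])
--
-- def turn_ip_to_bin(ip):
--     ip_splitted = ip.split('.')
--     binary_ip_list = [dec_to_bin(int(octet)) for octet in ip_splitted]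
--     for octet in binary_ip_list:
--         if len(octet) != 8:
--             count = 8 - len(octet)
--             new = count * "0" + octet
--             binary_ip_list[binary_ip_list.index(octet)] = new
--     return '.'.join(binary_ip_list)
-- ===== SOURCE B (Python) =====
-- def turn_ip_to_bin(ip):
--     return '.'.join(format(int(octet), '08b') for octet in ip.split('.'))
-- ===== Notes on version B (the rewrite author's own statement) =====
-- stated objective: idiomatic
-- what changed: Replaced the hand-rolled divide-by-2 digit loop plus the .index-based second padding pass with a single comprehension that formats each octet directly with the builtin zero-padded 8-bit binary format specifier.
import Mathlib
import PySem

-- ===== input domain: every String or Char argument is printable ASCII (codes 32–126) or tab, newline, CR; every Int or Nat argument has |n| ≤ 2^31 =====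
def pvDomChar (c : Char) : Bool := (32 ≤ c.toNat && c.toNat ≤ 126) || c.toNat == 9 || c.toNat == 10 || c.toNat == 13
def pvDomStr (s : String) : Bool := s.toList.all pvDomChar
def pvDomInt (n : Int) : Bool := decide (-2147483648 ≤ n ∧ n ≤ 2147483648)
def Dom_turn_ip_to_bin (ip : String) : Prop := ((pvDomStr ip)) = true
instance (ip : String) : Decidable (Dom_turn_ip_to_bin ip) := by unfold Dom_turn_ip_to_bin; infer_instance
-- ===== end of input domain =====

-- B replaces A's hand-rolled divide-by-2 digit loop and the second .index-based
-- padding pass with one idiomatic pass that formats each octet with '08b'.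

-- ===== PORT A =====
-- the while loop of dec_to_bin; fuel (decimal.toNat + 1) is a totality guard only,
-- never exhausted on the nonnegative values Pre_ admits
def decToBinLoop : Nat → Int → List String → List String × Int
  | 0, d, acc => (acc, d)
  | fuel + 1, d, acc =>
    if d ≠ 1 then
      if d = 0 then (acc, d)
      else if PySem.Int.mod d 2 = 0 then
        decToBinLoop fuel (PySem.Int.floordiv d 2) (acc ++ ["0"])
      else if PySem.Int.mod d 2 = 1 then
        decToBinLoop fuel (PySem.Int.floordiv d 2) (acc ++ ["1"])
      else (acc, d)
    else (acc, d)

def dec_to_bin (decimal : Int) : String :=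
  let r := decToBinLoop (decimal.toNat + 1) decimal []
  let mylist := if r.2 = 0 then r.1 ++ ["0"] else r.1 ++ ["1"]
  PySem.Str.join "" ((PySem.List.slice? mylist none none (-1)).getD [])  -- ''.join(mylist[::-1])

-- body of A's 'for octet in binary_ip_list' (CPython iterates by live index)
def padBody (acc : List String) (i : Nat) : List String :=
  let octet := acc.getD i ""
  if PySem.Str.len octet ≠ 8 then
    -- new = count * "0" + octet  (a negative count gives the empty string, as in Python)
    let newS := String.ofList (List.replicate ((8 - PySem.Str.len octet).toNat) '0' ++ octet.toList)
    match PySem.List.index? acc octet with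
    | some j => acc.set j newS
    | none => acc   -- unreachable: octet is an element of acc
  else acc

def turn_ip_to_bin (ip : String) : String :=
  let ip_splitted := (PySem.Str.split? ip ".").getD []
  let binary_ip_list := ip_splitted.map (fun octet => dec_to_bin ((PySem.Int.ofStr? octet).getD 0))
  let final := (List.range binary_ip_list.length).foldl padBody binary_ip_list
  PySem.Str.join "." final

-- ===== PORT B =====
-- format(n, 'b') for n ≥ 0 (the only values Pre_ admits)
def fmtB (n : Int) : List Char :=
  if n ≤ 0 then ['0']
  else (Nat.digits 2 n.toNat).reverse.map (fun d => if d = 1 then '1' else '0')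

-- format(n, '08b')
def fmt08b (n : Int) : String :=
  let s := fmtB n
  String.ofList (List.replicate (8 - s.length) '0' ++ s)

def turn_ip_to_bin_alt (ip : String) : String :=
  PySem.Str.join "."
    (((PySem.Str.split? ip ".").getD []).map (fun octet => fmt08b ((PySem.Int.ofStr? octet).getD 0)))

-- ===== PRECONDITION & SPEC =====
-- Pre_ excludes exactly the inputs on which A does not return: an octet on which
-- int() raises ValueError, or a negative octet, on which A's while loop never terminates.
def Pre_turn_ip_to_bin (ip : String) : Prop :=
  ∀ o ∈ (PySem.Str.split? ip ".").getD [],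
    (PySem.Int.ofStr? o).isSome = true ∧ 0 ≤ (PySem.Int.ofStr? o).getD 0
instance (ip : String) : Decidable (Pre_turn_ip_to_bin ip) := by unfold Pre_turn_ip_to_bin; infer_instance

def pvWitness_turn_ip_to_bin : String := "192.168.0.1"

def Spec_turn_ip_to_bin (ip : String) (out : String) : Prop := out = turn_ip_to_bin_alt ip
instance (ip : String) (out : String) : Decidable (Spec_turn_ip_to_bin ip out) := by unfold Spec_turn_ip_to_bin; infer_instance

-- ===== CLAIM (what is proved, stated in full; the proofs are below) =====
def Claim_equal_turn_ip_to_bin : Prop := ∀ (ip : String), Dom_turn_ip_to_bin ip → Pre_turn_ip_to_bin ip → Spec_turn_ip_to_bin ip (turn_ip_to_bin ip)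

-- ===== LEMMAS AND PROOFS =====

-- what one visit of A's padding pass does to an element
def pad8 (s : String) : String :=
  String.ofList (List.replicate ((8 - PySem.Str.len s).toNat) '0' ++ s.toList)

theorem strLen_eq (s : String) : PySem.Str.len s = (s.toList.length : Int) :=
  PySem.Str.len_eq s

theorem pad8_len (s : String) : (pad8 s).toList.length = max 8 s.toList.length := by
  rw [pad8, String.toList_ofList, List.length_append, List.length_replicate, strLen_eq]
  omega

theorem pad8_of_long (s : String) (h : 8 ≤ s.toList.length) : pad8 s = s := by
  have h0 : ((8 : Int) - PySem.Str.len s).toNat = 0 := by rw [strLen_eq]; omega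
  rw [pad8, h0, List.replicate_zero, List.nil_append, String.ofList_toList]

theorem set_index_self {α : Type} [BEq α] [LawfulBEq α] (l : List α) (v : α) (j : Nat)
    (h : PySem.List.index? l v = some j) : l.set j v = l := by
  obtain ⟨hj, hv, _⟩ := PySem.List.getElem_of_index?_eq_some h
  apply List.ext_getElem (by simp)
  intro i h1 h2
  by_cases hij : j = i
  · subst hij; simp [hv]
  · rw [List.getElem_set_ne hij]

theorem padBody_invariant (l : List String) (i : Nat) (hi : i < l.length) :
    padBody ((l.take i).map pad8 ++ l.drop i) i = (l.take (i+1)).map pad8 ++ l.drop (i+1) := by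
  have hlen : ((l.take i).map pad8).length = i := by
    simp [List.length_take, Nat.min_eq_left (Nat.le_of_lt hi)]
  have hdrop : l.drop i = l[i] :: l.drop (i+1) := List.drop_eq_getElem_cons hi
  have hget : ((l.take i).map pad8 ++ l.drop i).getD i "" = l[i] := by
    rw [List.getD_eq_getElem?_getD, List.getElem?_append_right (by rw [hlen]), hlen,
      Nat.sub_self, hdrop]
    rfl
  have htake : (l.take (i+1)).map pad8 = (l.take i).map pad8 ++ [pad8 l[i]] := by
    rw [List.take_add_one, List.getElem?_eq_getElem hi, Option.toList_some, List.map_append,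
      List.map_cons, List.map_nil]
  by_cases hshort : PySem.Str.len l[i] = 8
  · -- length exactly 8: skipped, and pad8 is the identity there
    have hid : pad8 l[i] = l[i] := pad8_of_long _ (by rw [strLen_eq] at hshort; omega)
    simp only [padBody, hget, hshort]
    rw [htake, hdrop]
    simp [hid]
  · by_cases hlt : l[i].toList.length < 8
    · -- short: it differs from every already-padded element, so .index finds position i
      have hne : l[i] ∉ (l.take i).map pad8 := by
        intro hmem'
        obtain ⟨t, _, heq⟩ := List.mem_map.mp hmem'
        have := pad8_len t
        rw [heq] at this
        omega
      have hidx : PySem.List.index? ((l.take i).map pad8 ++ l.drop i) l[i] =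
          some ((l.take i).map pad8).length := by
        rw [hdrop, ← List.singleton_append, ← List.append_assoc]
        rw [PySem.List.index?_append_of_mem _ (by simp)]
        exact PySem.List.index?_append_singleton_self _ _ hne
      simp only [padBody, hget, hidx]
      rw [if_pos hshort, List.set_append_right _ _ (Nat.le_refl _), Nat.sub_self, hdrop,
        List.set_cons_zero, htake, List.append_assoc, List.singleton_append]
      rfl
    · -- longer than 8: the pad is empty, new == octet, and setting an equal value changes nothing
      have hl8 : l[i].toList.length ≠ 8 := by
        intro e; exact hshort (by rw [strLen_eq, e]; norm_num)
      have h8 : 8 ≤ l[i].toList.length := by omega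
      have hcnt : ((8 : Int) - PySem.Str.len l[i]).toNat = 0 := by rw [strLen_eq]; omega
      have hmem : l[i] ∈ (l.take i).map pad8 ++ l.drop i :=
        List.mem_append_right _ (by rw [hdrop]; exact List.mem_cons_self)
      have hsome : (PySem.List.index? ((l.take i).map pad8 ++ l.drop i) l[i]).isSome = true :=
        (PySem.List.index?_isSome_iff _ _).mpr hmem
      obtain ⟨j, hj⟩ := Option.isSome_iff_exists.mp hsome
      simp only [padBody, hget, hj]
      rw [if_pos hshort, hcnt, List.replicate_zero, List.nil_append, String.ofList_toList,
        set_index_self _ _ _ hj, htake, hdrop, pad8_of_long _ h8, List.append_assoc,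
        List.singleton_append]

theorem padFold_range' (l : List String) :
    ∀ (c i : Nat), i + c = l.length →
      (List.range' i c).foldl padBody ((l.take i).map pad8 ++ l.drop i) = l.map pad8 := by
  intro c
  induction c with
  | zero =>
    intro i hi
    rw [List.range']
    simp only [List.foldl_nil]
    rw [show i = l.length by omega]
    simp
  | succ n ih =>
    intro i hi
    rw [List.range'_succ]
    simp only [List.foldl_cons]
    rw [padBody_invariant l i (by omega), ih (i+1) (by omega)]

theorem padFold_eq (l : List String) :
    (List.range l.length).foldl padBody l = l.map pad8 := by
  have h := padFold_range' l l.length 0 (by omega)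
  simpa [List.range_eq_range'] using h

-- the digits A's while loop collects, least significant first ([] once d < 2)
def lsbStrs : Nat → List String
  | 0 => []
  | 1 => []
  | d + 2 => (if (d + 2) % 2 = 0 then "0" else "1") :: lsbStrs ((d + 2) / 2)
decreasing_by exact Nat.div_lt_self (by omega) (by omega)

theorem decToBinLoop_spec : ∀ (fuel d : Nat) (acc : List String), d < fuel →
    decToBinLoop fuel (d : Int) acc = (acc ++ lsbStrs d, if d = 0 then 0 else 1) := by
  intro fuel
  induction fuel with
  | zero => intro d acc h; omega
  | succ n ih =>
    intro d acc h
    match d with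
    | 0 => simp [decToBinLoop, lsbStrs]
    | 1 => simp [decToBinLoop, lsbStrs]
    | d + 2 =>
      have h1 : ¬ ¬ ((d + 2 : Nat) : Int) ≠ 1 := by push_cast; omega
      have h0 : ¬ ((d + 2 : Nat) : Int) = 0 := by push_cast; omega
      have hmod : PySem.Int.mod ((d + 2 : Nat) : Int) 2 = (((d + 2) % 2 : Nat) : Int) := by
        rw [PySem.Int.mod_eq_emod_of_pos (by omega)]; omega
      have hdiv : PySem.Int.floordiv ((d + 2 : Nat) : Int) 2 = (((d + 2) / 2 : Nat) : Int) := by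
        rw [PySem.Int.floordiv_eq_ediv_of_pos (by omega)]; omega
      have hdlt : (d + 2) / 2 < n := by omega
      have e1 : ¬ (d + 2) / 2 = 0 := by omega
      have e2 : ¬ d + 2 = 0 := by omega
      rw [decToBinLoop, if_pos (not_not.mp h1), if_neg h0, hmod, hdiv]
      by_cases hpar : (d + 2) % 2 = 0
      · have hc : (((d + 2) % 2 : Nat) : Int) = 0 := by exact_mod_cast hpar
        rw [if_pos hc, ih _ _ hdlt, if_neg e1, if_neg e2,
          show lsbStrs (d + 2) = "0" :: lsbStrs ((d + 2) / 2) by rw [lsbStrs, if_pos hpar]]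
        simp
      · have hp1 : (d + 2) % 2 = 1 := by omega
        have hc0 : ¬ (((d + 2) % 2 : Nat) : Int) = 0 := by rw [hp1]; omega
        have hc1 : (((d + 2) % 2 : Nat) : Int) = 1 := by exact_mod_cast hp1
        rw [if_neg hc0, if_pos hc1, ih _ _ hdlt, if_neg e1, if_neg e2,
          show lsbStrs (d + 2) = "1" :: lsbStrs ((d + 2) / 2) by rw [lsbStrs, if_neg hpar]]
        simp

theorem lsbStrs_append_one (n : Nat) (hn : 1 ≤ n) :
    lsbStrs n ++ ["1"] = (Nat.digits 2 n).map (fun d => if d = 1 then "1" else "0") := by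
  induction n using Nat.strong_induction_on with
  | _ n ih =>
    match n with
    | 1 => simp [lsbStrs]
    | d + 2 =>
      rw [Nat.digits_def' (by omega) (by omega), List.map_cons, lsbStrs]
      have h2 : 1 ≤ (d + 2) / 2 := by omega
      rw [List.cons_append, ih ((d + 2) / 2) (Nat.div_lt_self (by omega) (by omega)) h2]
      congr 1
      rcases Nat.mod_two_eq_zero_or_one (d + 2) with h | h <;> simp [h]

theorem dec_to_bin_eq (n : Nat) : dec_to_bin (n : Int) = String.ofList (fmtB (n : Int)) := by
  by_cases hn : n = 0
  · subst hn; decide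
  · unfold dec_to_bin
    have htn : ((n : Int).toNat) = n := by omega
    rw [htn, decToBinLoop_spec (n + 1) n [] (by omega)]
    simp only [if_neg hn, List.nil_append]
    have hone : ¬ ((1 : Int) = 0) := by omega
    rw [if_neg hone, PySem.List.slice?_none_none_neg_one, Option.getD_some]
    have hlist : lsbStrs n ++ ["1"] = (Nat.digits 2 n).map (fun d => if d = 1 then "1" else "0") :=
      lsbStrs_append_one n (by omega)
    rw [hlist]
    have hfmt : fmtB (n : Int) =
        (Nat.digits 2 n).reverse.map (fun d => if d = 1 then '1' else '0') := by
      rw [fmtB, if_neg (by omega), htn]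
    calc PySem.Str.join "" ((Nat.digits 2 n).map (fun d => if d = 1 then "1" else "0")).reverse
        = String.ofList (PySem.Str.join ""
            ((Nat.digits 2 n).map (fun d => if d = 1 then "1" else "0")).reverse).toList := by
          rw [String.ofList_toList]
      _ = String.ofList (fmtB (n : Int)) := by
          rw [PySem.Str.toList_join, hfmt]
          congr 1
          have hmaps : (String.toList ∘ fun d : Nat => if d = 1 then "1" else "0") =
              (fun c => [c]) ∘ (fun d : Nat => if d = 1 then '1' else '0') := by
            funext d
            by_cases hd : d = 1 <;> simp [hd]
          rw [← List.map_reverse, List.map_map, hmaps, ← List.map_map,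
            show ("".toList) = ([] : List Char) from rfl]
          exact PySem.Chars.join_nil_singletons _

theorem pad8_dec_to_bin (n : Nat) : pad8 (dec_to_bin (n : Int)) = fmt08b (n : Int) := by
  rw [dec_to_bin_eq]
  simp only [pad8, fmt08b, String.toList_ofList, strLen_eq]
  rw [show ((8 : Int) - ((fmtB (n : Int)).length : Int)).toNat = 8 - (fmtB (n : Int)).length by
    omega]

-- ===== VERDICT (by name: the statement is the Claim_ definition above) =====
theorem turn_ip_to_bin_spec : Claim_equal_turn_ip_to_bin := by
  intro ip _ hpre
  unfold Spec_turn_ip_to_bin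
  simp only [turn_ip_to_bin, turn_ip_to_bin_alt]
  rw [padFold_eq, List.map_map]
  refine congrArg (PySem.Str.join ".") ?_
  refine List.map_congr_left ?_
  intro o ho
  obtain ⟨hsome, hnn⟩ := hpre o ho
  obtain ⟨m, hm⟩ := Option.isSome_iff_exists.mp hsome
  rw [hm] at hnn
  simp only [Option.getD_some] at hnn
  simp only [Function.comp_apply, hm, Option.getD_some]
  rw [show m = ((m.toNat : Nat) : Int) by omega]
  exact pad8_dec_to_bin m.toNat
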